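-- pv_equiv track=rewrite | github.com/chaewonkong/algorithms | python/kakao-test/cache.py | run_time
-- ===== SOURCE A (Python) =====
-- def run_time(cache_size, cities):
-- 	"""Return runtime for given cache_size and array"""
--
-- 	cache = {}
-- 	cache_order = []
-- 	time = 0
--
-- 	if cache_size == 0:
-- 		return (len(cities) * 5)
--
-- 	for city in cities:
-- 		city = city.lower()
-- 		if city in cache:
-- 			cache[city] += 1
-- 			time += 1
-- 		else:
-- 			if len(cache_order) < cache_size:
-- 				cache_order.append(city)
-- 				cache[city] = 1
-- 				time += 5
-- 			else:
-- 				i = 0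
-- 				while i <= cache_size:
-- 					if cache[cache_order[i]] == min(cache.values()):
-- 						cache.pop(cache_order.pop(i))
-- 						cache_order.append(city)
-- 						cache[city] = 1
-- 						time += 5
-- 						break
-- 					else:
-- 						i += 1
--
-- 	return time
-- ===== SOURCE B (Python) =====
-- def run_time(cache_size, cities):
--     """Return runtime for given cache_size and array"""
--     # no usable cache: every access is a straight miss costing 5
--     if cache_size <= 0:
--         return len(cities) * 5
--
--     cache = {}  # city -> (hit count, insertion sequence number)
--     seq = 0
--     time = 0
--     for city in cities:
--         city = city.lower()
--         if city in cache:
--             count, s = cache[city]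
--             cache[city] = (count + 1, s)
--             time += 1
--         else:
--             if len(cache) >= cache_size:
--                 # LFU eviction, oldest insertion first on ties
--                 victim = min(cache, key=lambda c: cache[c])
--                 del cache[victim]
--             seq += 1
--             cache[city] = (1, seq)
--             time += 5
--     return time
-- ===== Notes on version B (the rewrite author's own statement) =====
-- stated objective: simpler
-- what changed: B drops A's parallel cache_order list and its manual min-scan-with-pop while loop, keeping a single dict city->(count, insertion seq) and evicting via min over (count, seq) pairs, with one early return for non-positive cache sizes.
-- intended difference: For cache_size < 0 with a nonempty city list A returns 0 (its while-loop guard silently skips every miss), while B returns 5*len(cities) — every access a miss costing 5, exactly what A itself returns for cache_size == 0 — the intended runtime of a cache that holds nothing. — e.g. on run_time(-1, ["a"]): A returns 0, B returns 5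
import Mathlib
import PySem

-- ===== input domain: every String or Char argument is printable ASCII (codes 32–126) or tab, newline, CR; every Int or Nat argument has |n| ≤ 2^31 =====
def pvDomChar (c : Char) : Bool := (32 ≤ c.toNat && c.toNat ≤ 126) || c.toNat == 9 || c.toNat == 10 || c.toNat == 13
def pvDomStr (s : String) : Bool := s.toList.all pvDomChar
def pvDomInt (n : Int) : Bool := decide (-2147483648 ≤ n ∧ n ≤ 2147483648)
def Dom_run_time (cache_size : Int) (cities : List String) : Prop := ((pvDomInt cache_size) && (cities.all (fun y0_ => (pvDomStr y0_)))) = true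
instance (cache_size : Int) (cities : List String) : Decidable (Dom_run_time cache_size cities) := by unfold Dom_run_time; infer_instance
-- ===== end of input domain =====

-- B replaces A's cache dict + parallel eviction-order list + manual min-scan by a single
-- dict mapping city -> (count, insertion seq), evicted via min on the (count, seq) pair;
-- on negative cache_size B charges every access as a miss (see D_ below). Objective: simpler.

-- ===== PORT A =====
-- A's inner 'while i <= cache_size' loop; fuel = number of remaining iterations
-- ((cache_size+1).toNat at entry), i is Python's running index.
-- The two 'none' fallbacks mark spots where Python would raise IndexError
-- (cache_order[i] / cache_order.pop(i)): unreachable from run_time's initial state,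
-- as is the getD default on cache[...] (KeyError) / min(cache.values()) (ValueError).
def run_time_evict (c : String) :
    Nat → Int → PySem.Dict String Int → List String → Int →
    PySem.Dict String Int × List String × Int
  | 0, _, d, l, t => (d, l, t)
  | fuel+1, i, d, l, t =>
    match PySem.List.pyGet? l i with
    | none => (d, l, t)
    | some key =>
      if d.getD key 0 = (PySem.List.min? d.values (fun v => v)).getD 0 then
        match PySem.List.pop? l i with
        | none => (d, l, t)
        | some (popped, l') => ((d.erase popped).insert c 1, l' ++ [c], t + 5)
      else
        run_time_evict c fuel (i + 1) d l t

-- the body of A's 'for city in cities' loop, state = (cache, cache_order, time)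
def run_time_step (cache_size : Int)
    (s : PySem.Dict String Int × List String × Int) (city : String) :
    PySem.Dict String Int × List String × Int :=
  let c := PySem.Str.lower city
  if s.1.contains c then
    (s.1.insert c (s.1.getD c 0 + 1), s.2.1, s.2.2 + 1)
  else if (s.2.1.length : Int) < cache_size then
    (s.1.insert c 1, s.2.1 ++ [c], s.2.2 + 5)
  else
    run_time_evict c (cache_size + 1).toNat 0 s.1 s.2.1 s.2.2

def run_time (cache_size : Int) (cities : List String) : Int :=
  if cache_size = 0 then (cities.length : Int) * 5
  else (cities.foldl (run_time_step cache_size) (PySem.Dict.empty, [], 0)).2.2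

-- ===== PORT B =====
-- the body of B's loop, state = (cache, seq, time); cache maps city -> (count, seq)
def run_time_alt_step (cache_size : Int)
    (s : PySem.Dict String (Int × Int) × Int × Int) (city : String) :
    PySem.Dict String (Int × Int) × Int × Int :=
  let c := PySem.Str.lower city
  match s.1.get? c with
  | some cs => (s.1.insert c (cs.1 + 1, cs.2), s.2.1, s.2.2 + 1)
  | none =>
    let b :=
      if cache_size ≤ (s.1.size : Int) then
        -- victim = min(cache, key=lambda c: cache[c]); the dict is nonempty here
        -- (size ≥ cache_size ≥ 1), so the 'none' (Python ValueError) arm is unreachable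
        match PySem.List.min2? s.1.keys
            (fun k => (s.1.getD k (0, 0)).1) (fun k => (s.1.getD k (0, 0)).2) with
        | some victim => s.1.erase victim
        | none => s.1
      else s.1
    (b.insert c (1, s.2.1 + 1), s.2.1 + 1, s.2.2 + 5)

def run_time_alt (cache_size : Int) (cities : List String) : Int :=
  if cache_size ≤ 0 then (cities.length : Int) * 5
  else (cities.foldl (run_time_alt_step cache_size) (PySem.Dict.empty, 0, 0)).2.2

-- ===== PRECONDITION & SPEC =====
-- On cache_size < 0 with a nonempty city list, A returns 0 (its 'while i <= cache_size'
-- guard is instantly false, so every miss is a silent no-op that costs nothing), while B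
-- returns 5*len(cities) — every access is a miss costing 5, exactly what A itself returns
-- for cache_size == 0; B's is the intended runtime of a cache that can hold nothing.
def D_run_time (cache_size : Int) (cities : List String) : Prop :=
  cache_size < 0 ∧ cities ≠ []
instance (cache_size : Int) (cities : List String) : Decidable (D_run_time cache_size cities) := by
  unfold D_run_time; infer_instance

def Spec_run_time (cache_size : Int) (cities : List String) (out : Int) : Prop :=
  ¬ D_run_time cache_size cities → out = run_time_alt cache_size cities
instance (cache_size : Int) (cities : List String) (out : Int) : Decidable (Spec_run_time cache_size cities out) := by
  unfold Spec_run_time; infer_instance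

def pvDiffWitness_run_time : Int × List String := (-1, ["a"])
def pvDiffWitnessOut_run_time : Int × Int := (0, 5)

-- ===== CLAIM (what is proved, stated in full; the proofs are below) =====
def Claim_unchanged_run_time : Prop := ∀ (cache_size : Int) (cities : List String), Dom_run_time cache_size cities → Spec_run_time cache_size cities (run_time cache_size cities)
def Claim_changed_run_time : Prop := Dom_run_time (pvDiffWitness_run_time.1) (pvDiffWitness_run_time.2) ∧ D_run_time (pvDiffWitness_run_time.1) (pvDiffWitness_run_time.2) ∧ run_time (pvDiffWitness_run_time.1) (pvDiffWitness_run_time.2) = pvDiffWitnessOut_run_time.1 ∧ run_time_alt (pvDiffWitness_run_time.1) (pvDiffWitness_run_time.2) = pvDiffWitnessOut_run_time.2 ∧ pvDiffWitnessOut_run_time.1 ≠ pvDiffWitnessOut_run_time.2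
def Claim_exact_run_time : Prop := ∀ (cache_size : Int) (cities : List String), Dom_run_time cache_size cities → D_run_time cache_size cities → run_time cache_size cities ≠ run_time_alt cache_size cities

-- ===== LEMMAS AND PROOFS =====

-- the loop invariant tying A's state (cache d, order list l) to B's state (cache b, seq bound n)
def InvRT (cs : Int) (d : PySem.Dict String Int) (l : List String)
    (b : PySem.Dict String (Int × Int)) (n : Int) : Prop :=
  d.items = b.items.map (fun p => (p.1, p.2.1)) ∧
  l = b.keys ∧
  b.keys.Nodup ∧
  b.items.Pairwise (fun p q => p.2.2 < q.2.2) ∧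
  (∀ p ∈ b.items, p.2.2 ≤ n) ∧
  (l.length : Int) ≤ cs

-- `min2?` on Int-valued keys returns a lexicographically minimal element
theorem min2?_aux {α : Type} (k1 k2 : α → Int) :
    ∀ (xs : List α) (m0 : α),
      ∃ m, List.foldl (fun acc x =>
          match acc with
          | none => some x
          | some m =>
            if (decide (k1 x < k1 m) || !decide (k1 m < k1 x) && decide (k2 x < k2 m)) = true
            then some x else some m)
        (some m0) xs = some m ∧
        (m = m0 ∨ m ∈ xs) ∧ (k1 m < k1 m0 ∨ (k1 m = k1 m0 ∧ k2 m ≤ k2 m0)) ∧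
        ∀ y ∈ xs, k1 m < k1 y ∨ (k1 m = k1 y ∧ k2 m ≤ k2 y) := by
  intro xs
  induction xs with
  | nil => intro m0; exact ⟨m0, rfl, Or.inl rfl, Or.inr ⟨rfl, le_refl _⟩, by simp⟩
  | cons x rest ih =>
    intro m0
    simp only [List.foldl_cons]
    have hcb : ((decide (k1 x < k1 m0) || !decide (k1 m0 < k1 x) && decide (k2 x < k2 m0)) = true)
        ↔ (k1 x < k1 m0 ∨ (¬ k1 m0 < k1 x ∧ k2 x < k2 m0)) := by simp
    by_cases hc : k1 x < k1 m0 ∨ (¬ k1 m0 < k1 x ∧ k2 x < k2 m0)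
    · rw [if_pos (hcb.mpr hc)]
      obtain ⟨m, hm, hmem, hrel, hall⟩ := ih x
      refine ⟨m, hm, Or.inr (List.mem_cons.mpr hmem), ?_, ?_⟩
      · rcases hrel with h | h <;> rcases hc with h2 | ⟨h2a, h2b⟩ <;> omega
      · intro y hy
        rcases List.mem_cons.mp hy with rfl | hy'
        · exact hrel
        · exact hall y hy'
    · rw [if_neg (fun h => hc (hcb.mp h))]
      obtain ⟨m, hm, hmem, hrel, hall⟩ := ih m0
      rw [not_or] at hc
      obtain ⟨hc1, hc2⟩ := hc
      rw [not_and_or, not_not] at hc2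
      have hc : ¬ k1 x < k1 m0 ∧ (k1 m0 < k1 x ∨ ¬ k2 x < k2 m0) := ⟨hc1, hc2⟩
      refine ⟨m, hm, by tauto, hrel, ?_⟩
      intro y hy
      rcases List.mem_cons.mp hy with rfl | hy'
      · rcases hrel with h | h <;> rcases hc with ⟨h2a, h2b⟩ <;> rcases h2b with h2b | h2b <;> omega
      · exact hall y hy'


theorem min2?_int_spec {α : Type} (xs : List α) (k1 k2 : α → Int) (h : xs ≠ []) :
    ∃ m, PySem.List.min2? xs k1 k2 = some m ∧ m ∈ xs ∧
      ∀ y ∈ xs, k1 m < k1 y ∨ (k1 m = k1 y ∧ k2 m ≤ k2 y) := by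
  cases xs with
  | nil => exact absurd rfl h
  | cons x rest =>
    obtain ⟨m, hm, hmem, hrel, hall⟩ := min2?_aux k1 k2 rest x
    refine ⟨m, ?_, List.mem_cons.mpr hmem, ?_⟩
    · simpa [PySem.List.min2?, List.foldl_cons] using hm
    · intro y hy
      rcases List.mem_cons.mp hy with rfl | hy'
      · exact hrel
      · exact hall y hy'

-- lookups through A's cache are first-component lookups through B's cache
theorem find?_fst_filter_ne {ν : Type} (items : List (String × ν)) (v x : String)
    (hxv : x ≠ v) :
    (items.filter (fun p => !(p.1 == v))).find? (fun p => p.1 == x) =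
      items.find? (fun p => p.1 == x) := by
  induction items with
  | nil => rfl
  | cons p rest ih =>
    by_cases hp : p.1 = x
    · simp [hp, hxv]
    · by_cases hv : p.1 = v <;> simp [List.filter_cons, List.find?_cons, hp, hv, ih, Ne.symm hxv]

-- l.eraseIdx at the (unique) position of v removes exactly the v-entries
theorem eraseIdx_eq_filter_of_nodup :
    ∀ (l : List String) (j : Nat) (hj : j < l.length), l.Nodup →
      l.eraseIdx j = l.filter (fun k => k != (l[j]'hj)) := by
  intro l
  induction l with
  | nil => intro j hj; simp at hj
  | cons x rest ih =>
    intro j hj hnd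
    rcases j with _ | j
    · have hx : ∀ k ∈ rest, k ≠ x := fun k hk he => (by simp [he] at hk; exact (List.nodup_cons.mp hnd).1 hk)
      simp only [List.eraseIdx, List.getElem_cons_zero, List.filter_cons, bne_self_eq_false,
        Bool.false_eq_true, if_neg]
      rw [List.filter_eq_self.mpr]
      · simp
      · intro k hk; simpa using hx k hk
    · have hnd' := (List.nodup_cons.mp hnd).2
      have hxm : x ∉ rest := (List.nodup_cons.mp hnd).1
      have hne : x ≠ rest[j]'(by simpa using hj) := fun he => hxm (he ▸ List.getElem_mem _)
      simp only [List.eraseIdx, List.getElem_cons_succ, List.filter_cons]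
      rw [ih j (by simpa using hj) hnd']
      simp [hne]

theorem get?_map_fst (b : PySem.Dict String (Int × Int)) (d : PySem.Dict String Int)
    (h : d.items = b.items.map (fun p => (p.1, p.2.1))) (x : String) :
    d.get? x = (b.get? x).map Prod.fst := by
  simp only [PySem.Dict.get?, h, List.find?_map, Option.map_map]
  rfl

theorem erase_items_map (b : PySem.Dict String (Int × Int)) (d : PySem.Dict String Int)
    (h : d.items = b.items.map (fun p => (p.1, p.2.1))) (v : String) :
    (d.erase v).items = (b.erase v).items.map (fun p => (p.1, p.2.1)) := by
  simp only [PySem.Dict.erase, h, List.filter_map]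
  rfl

theorem get?_erase {ν : Type} (b : PySem.Dict String ν) (v x : String) :
    (b.erase v).get? x = if x = v then none else b.get? x := by
  by_cases hxv : x = v
  · subst hxv
    simp only [PySem.Dict.get?, PySem.Dict.erase, if_pos rfl]
    rw [List.find?_eq_none.mpr]
    · rfl
    · intro p hp
      rcases List.mem_filter.mp hp with ⟨_, hp2⟩
      simpa using hp2
  · simp only [PySem.Dict.get?, PySem.Dict.erase, if_neg hxv]
    rw [find?_fst_filter_ne _ _ _ hxv]

theorem keys_erase {ν : Type} (b : PySem.Dict String ν) (v : String) :
    (b.erase v).keys = b.keys.filter (fun k => k != v) := by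
  simp only [PySem.Dict.keys, PySem.Dict.erase, List.filter_map]
  rfl

-- A's while-loop pops the first index j0 whose count equals the minimum
theorem pop?_natCast (l : List String) (i : Nat) (hi : i < l.length) :
    PySem.List.pop? l (i : Int) = some ((l[i]'hi), l.eraseIdx i) := by
  simp [PySem.List.pop?, PySem.List.pyIdx?, hi]

theorem evict_loop_finds (c : String) :
    ∀ (fuel i : Nat) (d : PySem.Dict String Int) (l : List String) (t : Int) (j0 : Nat)
      (hj : j0 < l.length)
      (hP : d.getD (l[j0]'hj) 0 = (PySem.List.min? d.values (fun v => v)).getD 0)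
      (hmin : ∀ (k : Nat) (hk : k < l.length), i ≤ k → k < j0 →
            d.getD (l[k]'hk) 0 ≠ (PySem.List.min? d.values (fun v => v)).getD 0)
      (hij : i ≤ j0) (hfu : j0 < i + fuel),
      run_time_evict c fuel (i : Int) d l t =
        ((d.erase (l[j0]'hj)).insert c 1, l.eraseIdx j0 ++ [c], t + 5) := by
  intro fuel
  induction fuel with
  | zero => intro i d l t j0 _ _ _ hij hfu; omega
  | succ fuel ih =>
    intro i d l t j0 hj hP hmin hij hfu
    have hil : i < l.length := lt_of_le_of_lt hij hj
    have hpg : PySem.List.pyGet? l (i : Int) = some (l[i]'hil) := by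
      rw [PySem.List.pyGet?_natCast, List.getElem?_eq_getElem hil]
    rw [run_time_evict, hpg]
    dsimp only
    by_cases hij0 : i = j0
    · subst hij0
      rw [if_pos hP, pop?_natCast l i hil]
    · have hlt : i < j0 := lt_of_le_of_ne hij hij0
      rw [if_neg (hmin i hil (le_refl i) hlt)]
      have : ((i : Int) + 1) = ((i + 1 : Nat) : Int) := by push_cast; ring
      rw [this]
      exact ih (i+1) d l t j0 hj hP (fun k hk h1 h2 => hmin k hk (by omega) h2) (by omega) (by omega)

-- one loop iteration preserves the invariant and adds the same time on both sides
theorem step_rt (cs : Int) (hcs : 1 ≤ cs) (d : PySem.Dict String Int) (l : List String)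
    (b : PySem.Dict String (Int × Int)) (n : Int) (h : InvRT cs d l b n)
    (city : String) (t : Int) :
    ∃ d' l' b' n' t',
      run_time_step cs (d, l, t) city = (d', l', t') ∧
      run_time_alt_step cs (b, n, t) city = (b', n', t') ∧
      InvRT cs d' l' b' n' := by
  obtain ⟨hitems, hl, hnd, hpw, hbnd, hlen⟩ := h
  simp only [run_time_step, run_time_alt_step]
  generalize hcgen : PySem.Str.lower city = c
  have hget := get?_map_fst b d hitems
  have hsize : (b.size : Int) = (l.length : Int) := by
    simp [PySem.Dict.size, hl, PySem.Dict.keys]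
  cases hbc : b.get? c with
  | some p =>
    -- cache hit
    obtain ⟨cnt, sq⟩ := p
    have hdc : d.get? c = some cnt := by rw [hget, hbc]; rfl
    have hcont : d.contains c = true := by
      rw [PySem.Dict.contains_eq_isSome_get?, hdc]; rfl
    have hcontb : b.contains c = true := by
      rw [PySem.Dict.contains_eq_isSome_get?, hbc]; rfl
    have hgd : d.getD c 0 = cnt := by
      rw [PySem.Dict.getD_eq_get?_getD, hdc]; rfl
    have seq_pres : ∀ q ∈ b.items,
        (if (q.1 == c) = true then (c, (cnt + 1, sq)) else q).2.2 = q.2.2 := by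
      intro q hq
      by_cases hqc : q.1 = c
      · have hq2 : b.get? q.1 = some q.2 :=
          PySem.Dict.get?_of_mem_items b (by simpa using hq) hnd
        rw [hqc, hbc] at hq2
        have : q.2 = (cnt, sq) := by injection hq2 with h'; exact h'.symm
        simp [hqc, this]
      · simp [hqc]
    refine ⟨d.insert c (cnt + 1), l, b.insert c (cnt + 1, sq), n, t + 1, ?_, ?_,
      ?_, ?_, ?_, ?_, ?_, ?_⟩
    · simp [hcont, hgd]
    · simp
    · rw [PySem.Dict.items_insert_of_contains _ _ hcont,
        PySem.Dict.items_insert_of_contains _ _ hcontb, hitems, List.map_map, List.map_map]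
      apply List.map_congr_left
      intro q _
      by_cases hqc : q.1 = c <;> simp [Function.comp, hqc]
    · rw [PySem.Dict.keys_insert_of_contains _ _ hcontb, hl]
    · exact PySem.Dict.nodup_keys_insert _ _ _ hnd
    · rw [PySem.Dict.items_insert_of_contains _ _ hcontb, List.pairwise_map]
      refine List.Pairwise.imp_of_mem ?_ hpw
      intro p q hp hq hR
      rw [seq_pres p hp, seq_pres q hq]
      exact hR
    · intro p hp
      rw [PySem.Dict.items_insert_of_contains _ _ hcontb] at hp
      obtain ⟨q, hq, rfl⟩ := List.mem_map.mp hp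
      rw [seq_pres q hq]
      exact hbnd q hq
    · exact hlen
  | none =>
    -- cache miss
    have hdc : d.get? c = none := by rw [hget, hbc]; rfl
    have hcont : d.contains c = false := by
      rw [PySem.Dict.contains_eq_isSome_get?, hdc]; rfl
    have hcontb : b.contains c = false := by
      rw [PySem.Dict.contains_eq_isSome_get?, hbc]; rfl
    have hcmem : c ∉ b.keys := fun hm =>
      by rw [(PySem.Dict.contains_iff_mem_keys b c).mpr hm] at hcontb; cases hcontb
    by_cases hlt : (l.length : Int) < cs
    · -- room left: plain insert on both sides
      have hble : ¬ (cs ≤ (b.size : Int)) := by omega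
      refine ⟨d.insert c 1, l ++ [c], b.insert c (1, n + 1), n + 1, t + 5, ?_, ?_,
        ?_, ?_, ?_, ?_, ?_, ?_⟩
      · simp [hcont, hlt]
      · simp [hble]
      · rw [PySem.Dict.items_insert_of_not_contains _ _ hcont,
          PySem.Dict.items_insert_of_not_contains _ _ hcontb, hitems, List.map_append]
        rfl
      · rw [PySem.Dict.keys_insert_of_not_contains _ _ hcontb, hl]
      · exact PySem.Dict.nodup_keys_insert _ _ _ hnd
      · rw [PySem.Dict.items_insert_of_not_contains _ _ hcontb, List.pairwise_append]
        refine ⟨hpw, by simp, ?_⟩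
        intro p hp q hq
        simp only [List.mem_singleton] at hq
        subst hq
        have := hbnd p hp
        simp only []
        omega
      · intro p hp
        rw [PySem.Dict.items_insert_of_not_contains _ _ hcontb] at hp
        rcases List.mem_append.mp hp with h' | h'
        · exact le_trans (hbnd p h') (by omega)
        · simp only [List.mem_singleton] at h'; subst h'; simp
      · simp only [List.length_append, List.length_cons, List.length_nil]
        push_cast
        omega
    · -- cache full: eviction on both sides
      have hlcs : (l.length : Int) = cs := le_antisymm hlen (not_lt.mp hlt)
      have hitemlen : b.items.length = l.length := by
        rw [hl]; simp [PySem.Dict.keys]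
      have hlpos : 0 < l.length := by omega
      have hkne : b.keys ≠ [] := by
        rw [← hl]; intro h0; rw [h0] at hlpos; simp at hlpos
      obtain ⟨v, hveq, hvmem, hvspec⟩ := min2?_int_spec b.keys
        (fun k => (b.getD k (0, 0)).1) (fun k => (b.getD k (0, 0)).2) hkne
      have hble : cs ≤ (b.size : Int) := by omega
      have hvl : v ∈ l := hl ▸ hvmem
      obtain ⟨j0, hj, hvj⟩ := List.getElem_of_mem hvl
      -- positional facts
      have hilen : ∀ k : Nat, k < l.length → k < b.items.length := by omega
      have hlk : ∀ (k : Nat) (hk : k < l.length), (l[k]'hk) = (b.items[k]'(hilen k hk)).1 := by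
        intro k hk
        subst hl
        simp [PySem.Dict.keys]
      have hgetk : ∀ (k : Nat) (hk : k < l.length),
          b.get? (l[k]'hk) = some ((b.items[k]'(hilen k hk)).2) := by
        intro k hk
        rw [hlk k hk]
        exact PySem.Dict.get?_of_mem_items b (by simpa using List.getElem_mem (hilen k hk)) hnd
      have hK1 : ∀ (k : Nat) (hk : k < l.length),
          (b.getD (l[k]'hk) (0, 0)) = (b.items[k]'(hilen k hk)).2 := by
        intro k hk
        rw [PySem.Dict.getD_eq_get?_getD, hgetk k hk]
        rfl
      have hdk : ∀ (k : Nat) (hk : k < l.length),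
          d.getD (l[k]'hk) 0 = (b.items[k]'(hilen k hk)).2.1 := by
        intro k hk
        rw [PySem.Dict.getD_eq_get?_getD, hget, hgetk k hk]
        rfl
      -- the minimum of A's cache values
      have hvals : d.values = b.items.map (fun p => p.2.1) := by
        simp only [PySem.Dict.values, hitems, List.map_map]
        rfl
      have hvalne : d.values ≠ [] := by
        rw [hvals]
        intro h0
        rw [List.map_eq_nil_iff] at h0
        rw [h0] at hitemlen
        simp at hitemlen
        omega
      obtain ⟨mv, hmv⟩ : ∃ mv, PySem.List.min? d.values (fun v => v) = some mv := by
        cases hm : PySem.List.min? d.values (fun v => v) with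
        | none => exact absurd ((PySem.List.min?_eq_none_iff _ _).mp hm) hvalne
        | some mv => exact ⟨mv, rfl⟩
      have hmvmem : mv ∈ d.values := PySem.List.min?_mem hmv
      have hmvmin : ∀ y ∈ d.values, mv ≤ y := PySem.List.min?_isMin hmv
      -- the K1-value of any key is one of A's cache values, and conversely
      have hK1v : (b.getD v (0, 0)) = (b.items[j0]'(hilen j0 hj)).2 := by
        rw [← hvj]; exact hK1 j0 hj
      have hvP : d.getD v 0 = mv := by
        have h1 : mv ≤ (b.items[j0]'(hilen j0 hj)).2.1 := by
          apply hmvmin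
          rw [hvals]
          exact List.mem_map.mpr ⟨_, List.getElem_mem _, rfl⟩
        have h2 : (b.items[j0]'(hilen j0 hj)).2.1 ≤ mv := by
          obtain ⟨q, hq, hqv⟩ := List.mem_map.mp (hvals ▸ hmvmem)
          have hqk : q.1 ∈ b.keys := by
            simp only [PySem.Dict.keys]
            exact List.mem_map.mpr ⟨q, hq, rfl⟩
          have hqK1 : (b.getD q.1 (0, 0)) = q.2 := by
            rw [PySem.Dict.getD_eq_get?_getD,
              PySem.Dict.get?_of_mem_items b (by simpa using hq) hnd]
            rfl
          have := hvspec q.1 hqk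
          rw [hK1v, hqK1] at this
          rw [← hqv]
          rcases this with h' | ⟨h', _⟩ <;> omega
        rw [← hvj, hdk j0 hj]
        omega
      have hminP : ∀ (k : Nat) (hk : k < l.length), 0 ≤ k → k < j0 →
          d.getD (l[k]'hk) 0 ≠ (PySem.List.min? d.values (fun v => v)).getD 0 := by
        intro k hk _ hkj heq
        rw [hmv] at heq
        simp only [Option.getD_some] at heq
        rw [hdk k hk] at heq
        have hkK1 : (b.getD (l[k]'hk) (0, 0)) = (b.items[k]'(hilen k hk)).2 := hK1 k hk
        have hkmem : (l[k]'hk) ∈ b.keys := by rw [← hl]; exact List.getElem_mem hk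
        have hsp := hvspec _ hkmem
        rw [hK1v, hkK1] at hsp
        have hseq : (b.items[k]'(hilen k hk)).2.2 < (b.items[j0]'(hilen j0 hj)).2.2 := by
          have := List.pairwise_iff_getElem.mp hpw k j0 (hilen k hk) (hilen j0 hj) hkj
          exact this
        have hjmv : (b.items[j0]'(hilen j0 hj)).2.1 = mv := by
          rw [← hdk j0 hj, hvj]; exact hvP
        have hkeq : (b.items[k]'(hilen k hk)).2.1 = (b.items[j0]'(hilen j0 hj)).2.1 := by
          rw [heq, hjmv]
        rcases hsp with h' | ⟨h', h''⟩ <;> omega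
      -- A's loop locates exactly v
      have hfuel : j0 < 0 + (cs + 1).toNat := by
        have : ((cs + 1).toNat : Int) = cs + 1 := Int.toNat_of_nonneg (by omega)
        omega
      have hloop := evict_loop_finds c ((cs + 1).toNat) 0 d l t j0 hj
        (by rw [hvj, hvP, hmv]; rfl) hminP (Nat.zero_le _) hfuel
      rw [hvj] at hloop
      -- assemble
      have hcne : c ≠ v := fun h' => hcmem (h' ▸ hvmem)
      have hger : (b.erase v).get? c = none := by
        rw [get?_erase, if_neg hcne, hbc]
      have hcontb_er : (b.erase v).contains c = false := by
        rw [PySem.Dict.contains_eq_isSome_get?, hger]; rfl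
      have hgerd : (d.erase v).get? c = none := by
        rw [get?_erase, if_neg hcne, hdc]
      have hcontd_er : (d.erase v).contains c = false := by
        rw [PySem.Dict.contains_eq_isSome_get?, hgerd]; rfl
      refine ⟨(d.erase v).insert c 1, l.eraseIdx j0 ++ [c],
        (b.erase v).insert c (1, n + 1), n + 1, t + 5, ?_, ?_, ?_, ?_, ?_, ?_, ?_, ?_⟩
      · simp only [hcont, Bool.false_eq_true, if_false, hlt]
        simp at hloop
        exact hloop
      · simp [hble, hveq]
      · rw [PySem.Dict.items_insert_of_not_contains _ _ hcontd_er,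
          PySem.Dict.items_insert_of_not_contains _ _ hcontb_er,
          erase_items_map b d hitems v, List.map_append]
        rfl
      · rw [PySem.Dict.keys_insert_of_not_contains _ _ hcontb_er, keys_erase, ← hl,
          eraseIdx_eq_filter_of_nodup l j0 hj (hl ▸ hnd), hvj]
      · apply PySem.Dict.nodup_keys_insert
        rw [keys_erase]
        exact List.Nodup.filter _ hnd
      · rw [PySem.Dict.items_insert_of_not_contains _ _ hcontb_er, List.pairwise_append]
        refine ⟨List.Pairwise.sublist List.filter_sublist hpw, by simp, ?_⟩
        intro p hp q hq
        simp only [List.mem_singleton] at hq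
        subst hq
        have := hbnd p (List.mem_of_mem_filter hp)
        simp only []
        omega
      · intro p hp
        rw [PySem.Dict.items_insert_of_not_contains _ _ hcontb_er] at hp
        rcases List.mem_append.mp hp with h' | h'
        · exact le_trans (hbnd p (List.mem_of_mem_filter h')) (by omega)
        · simp only [List.mem_singleton] at h'; subst h'; simp
      · rw [List.length_append, List.length_eraseIdx, if_pos hj]
        push_cast
        simp only [List.length_cons, List.length_nil]
        omega

theorem fold_rt (cs : Int) (hcs : 1 ≤ cs) :
    ∀ (cities : List String) (d : PySem.Dict String Int) (l : List String)
      (b : PySem.Dict String (Int × Int)) (n t : Int), InvRT cs d l b n →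
      (cities.foldl (run_time_step cs) (d, l, t)).2.2 =
        (cities.foldl (run_time_alt_step cs) (b, n, t)).2.2 := by
  intro cities
  induction cities with
  | nil => intro d l b n t _; rfl
  | cons city rest ih =>
    intro d l b n t h
    obtain ⟨d', l', b', n', t', hA, hB, h'⟩ := step_rt cs hcs d l b n h city t
    simp only [List.foldl_cons, hA, hB]
    exact ih d' l' b' n' t' h'

-- with a negative cache_size A's loop never changes its state
theorem run_time_neg (cs : Int) (hcs : cs < 0) (cities : List String) :
    run_time cs cities = 0 := by
  have hfuel : (cs + 1).toNat = 0 := by omega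
  have hstep : ∀ (city : String) (t : Int),
      run_time_step cs (PySem.Dict.empty, [], t) city = (PySem.Dict.empty, [], t) := by
    intro city t
    unfold run_time_step
    have h1 : (PySem.Dict.empty : PySem.Dict String Int).contains (PySem.Str.lower city) = false := by
      rfl
    have h2 : ¬ ((0 : Int) < cs) := by omega
    simp [h1, h2, hfuel, run_time_evict]
  have hfold : ∀ (cities : List String) (t : Int),
      (cities.foldl (run_time_step cs) (PySem.Dict.empty, [], t)) = (PySem.Dict.empty, [], t) := by
    intro cities
    induction cities with
    | nil => intro t; rfl
    | cons city rest ih => intro t; rw [List.foldl_cons, hstep city t, ih t]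
  unfold run_time
  rw [if_neg (by omega), hfold]

-- ===== VERDICT (by name: the statement is the Claim_ definition above) =====
theorem run_time_spec : Claim_unchanged_run_time := by
  intro cs cities _ hD
  rcases lt_trichotomy cs 0 with hlt | heq | hgt
  · have hcit : cities = [] := by
      by_contra hne
      exact hD ⟨hlt, hne⟩
    subst hcit
    simp [run_time_neg cs hlt, run_time_alt]
  · subst heq
    simp [run_time, run_time_alt]
  · have h1 : (1 : Int) ≤ cs := hgt
    unfold run_time run_time_alt
    have hne : ¬ cs = 0 := by omega
    have hle : ¬ cs ≤ 0 := by omega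
    simp only [if_neg hne, if_neg hle]
    exact fold_rt cs h1 cities _ _ _ _ _
      ⟨by simp [PySem.Dict.empty], by simp [PySem.Dict.empty, PySem.Dict.keys],
       by simp [PySem.Dict.empty, PySem.Dict.keys], by simp [PySem.Dict.empty],
       by simp [PySem.Dict.empty], by simpa using le_trans zero_le_one h1⟩

theorem run_time_changed : Claim_changed_run_time := by
  unfold Claim_changed_run_time; decide

theorem run_time_tight : Claim_exact_run_time := by
  intro cs cities _ hD
  obtain ⟨hlt, hne⟩ := hD
  rw [run_time_neg cs hlt]
  unfold run_time_alt
  rw [if_pos (le_of_lt hlt)]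
  have : 0 < cities.length := List.length_pos_iff.mpr hne
  intro h
  omega
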